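-- pv_equiv track=rewrite | github.com/JoonHyeok-hozy-Kim/datastructure_and_algorithm_in_python | Contents/Part05_Array_Based_Sequences/part05_05_using_array_based_sequences.py | _transform
-- ===== SOURCE A (Python) =====
-- def _transform(original, code):
--     chr_list = list(original)
--     for i in range(len(chr_list)):
--         if chr_list[i].isupper():
--             chr_list[i] = code[ord(chr_list[i]) - ord('A')]
--         elif chr_list[i].islower():
--             chr_list[i] = code[26 + ord(chr_list[i]) - ord('a')]
--     return ''.join(chr_list)
-- ===== SOURCE B (Python) =====
-- def _transform(original, code):
--     # Sweep the 52-letter cipher alphabet: one full substitution pass per letter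
--     # that actually occurs in the string (outer loop over the alphabet, not the text).
--     letters = [chr(ord('A') + i) for i in range(26)] + [chr(ord('a') + i) for i in range(26)]
--     out = list(original)
--     for k, letter in enumerate(letters):
--         if letter in original:
--             sub = code[k]
--             out = [sub if c == letter else o for c, o in zip(original, out)]
--     return ''.join(out)
-- ===== Notes on version B (the rewrite author's own statement) =====
-- stated objective: alternative
-- what changed: B inverts the traversal: instead of A's single pass over the text with per-character case tests and index arithmetic, B loops over the 52-letter cipher alphabet and, for each letter present in the string, performs one whole-string substitution pass of that letter, so the text is rewritten letter-by-letter rather than position-by-position.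
import Mathlib
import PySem

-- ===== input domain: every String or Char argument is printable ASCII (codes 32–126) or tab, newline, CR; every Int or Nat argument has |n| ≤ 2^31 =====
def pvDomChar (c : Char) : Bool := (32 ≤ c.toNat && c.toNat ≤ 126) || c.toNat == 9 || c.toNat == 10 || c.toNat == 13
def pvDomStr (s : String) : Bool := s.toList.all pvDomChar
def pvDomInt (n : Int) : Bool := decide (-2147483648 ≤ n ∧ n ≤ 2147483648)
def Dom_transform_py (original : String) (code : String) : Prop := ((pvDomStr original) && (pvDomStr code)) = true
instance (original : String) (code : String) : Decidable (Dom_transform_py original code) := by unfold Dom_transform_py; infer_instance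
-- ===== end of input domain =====

-- B sweeps the 52-letter cipher alphabet and substitutes one letter per whole-string
-- pass (outer loop over the alphabet, not over the text) — an alternative traversal
-- order, not claimed faster.

-- ===== PORT A =====
-- loop body: if chr_list[i].isupper(): chr_list[i] = code[ord(chr_list[i]) - ord('A')]
--            elif chr_list[i].islower(): chr_list[i] = code[26 + ord(chr_list[i]) - ord('a')]
-- (pyGetD's default only fires where Python raises IndexError — excluded by Pre_)
def aStep (code : List Char) (acc : List Char) (i : Int) : List Char :=
  match PySem.List.pyGet? acc i with
  | none => acc
  | some c =>
    if PySem.Chars.isupper c then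
      PySem.List.pySetD acc i (PySem.List.pyGetD code ((c.toNat : Int) - 65) c)
    else if PySem.Chars.islower c then
      PySem.List.pySetD acc i (PySem.List.pyGetD code (26 + (c.toNat : Int) - 97) c)
    else acc

def transform_py (original : String) (code : String) : String :=
  let chrList := original.toList
  String.mk ((PySem.List.pyRange 0 (PySem.List.len chrList) 1).foldl (aStep code.toList) chrList)

-- ===== PORT B =====
-- letters = [chr(ord('A') + i) for i in range(26)] + [chr(ord('a') + i) for i in range(26)]
def lettersB : List Char :=
  (List.range 26).map (fun i => Char.ofNat (65 + i)) ++ (List.range 26).map (fun i => Char.ofNat (97 + i))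

-- loop body: if letter in original: sub = code[k]; out = [sub if c == letter else o for c, o in zip(original, out)]
-- ('letter in original' with a one-character needle is exactly character membership;
--  pyGetD's default only fires where Python raises IndexError — excluded by Pre_)
def bPass (original code : List Char) (out : List Char) (p : Int × Char) : List Char :=
  if original.contains p.2 then
    let sub := PySem.List.pyGetD code p.1 p.2
    (original.zip out).map (fun q => if q.1 = p.2 then sub else q.2)
  else out

def transform_py_alt (original : String) (code : String) : String :=
  String.mk ((PySem.List.enumerate lettersB).foldl (bPass original.toList code.toList) original.toList)

-- ===== PRECONDITION & SPEC =====
-- Pre_ excludes exactly the inputs on which the Python A raises IndexError: some letter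
-- of `original` whose cipher index is out of range of `code` (B raises there too).
def Pre_transform_py (original : String) (code : String) : Prop :=
  (original.toList.all (fun c =>
    (!PySem.Chars.isupper c || decide (c.toNat - 65 < code.toList.length)) &&
    (!PySem.Chars.islower c || decide (c.toNat - 71 < code.toList.length)))) = true
instance (original : String) (code : String) : Decidable (Pre_transform_py original code) := by
  unfold Pre_transform_py; infer_instance

def pvWitness_transform_py : String × String :=
  ("Hozy, hello!", "ABCDEFGHIJKLMNOPQRSTUVWXYZabcdefghijklmnopqrstuvwxyz")

def Spec_transform_py (original : String) (code : String) (out : String) : Prop :=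
  out = transform_py_alt original code
instance (original : String) (code : String) (out : String) : Decidable (Spec_transform_py original code out) := by
  unfold Spec_transform_py; infer_instance

-- ===== CLAIM (what is proved, stated in full; the proofs are below) =====
def Claim_equal_transform_py : Prop := ∀ (original : String) (code : String), Dom_transform_py original code → Pre_transform_py original code → Spec_transform_py original code (transform_py original code)

-- ===== LEMMAS AND PROOFS =====

-- the per-character transformation A's loop performs at each position
def fA (code : List Char) (c : Char) : Char :=
  if PySem.Chars.isupper c then PySem.List.pyGetD code ((c.toNat : Int) - 65) c
  else if PySem.Chars.islower c then PySem.List.pyGetD code (26 + (c.toNat : Int) - 97) c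
  else c

theorem isupper_iff (c : Char) : PySem.Chars.isupper c = true ↔ 65 ≤ c.toNat ∧ c.toNat ≤ 90 := by
  unfold PySem.Chars.isupper
  rw [Bool.and_eq_true, decide_eq_true_iff, decide_eq_true_iff, Char.le_def, Char.le_def,
      UInt32.le_iff_toNat_le, UInt32.le_iff_toNat_le]
  exact Iff.rfl

theorem islower_iff (c : Char) : PySem.Chars.islower c = true ↔ 97 ≤ c.toNat ∧ c.toNat ≤ 122 := by
  unfold PySem.Chars.islower
  rw [Bool.and_eq_true, decide_eq_true_iff, decide_eq_true_iff, Char.le_def, Char.le_def,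
      UInt32.le_iff_toNat_le, UInt32.le_iff_toNat_le]
  exact Iff.rfl

theorem aStep_at (code pre suf : List Char) (c : Char) :
    aStep code (pre ++ c :: suf) (pre.length : Int) = pre ++ fA code c :: suf := by
  unfold aStep fA
  rw [PySem.List.pyGet?_append_length]
  split_ifs <;> simp_all [PySem.List.pySetD_natCast]

theorem loopA (code : List Char) : ∀ (m k : Nat) (cs : List Char), k + m = cs.length →
    (PySem.List.pyRange (k : Int) (cs.length : Int) 1).foldl (aStep code)
      ((cs.take k).map (fA code) ++ cs.drop k) = cs.map (fA code) := by
  intro m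
  induction m with
  | zero =>
    intro k cs hk
    rw [PySem.List.pyRange_one_eq_nil (by omega)]
    simp [show k = cs.length by omega]
  | succ m ih =>
    intro k cs hk
    have hklt : k < cs.length := by omega
    rw [PySem.List.pyRange_one_cons (by exact_mod_cast hklt), List.foldl_cons]
    have hdrop : cs.drop k = cs[k] :: cs.drop (k + 1) := List.drop_eq_getElem_cons hklt
    have hlen : ((cs.take k).map (fA code)).length = k := by
      simp [List.length_take, Nat.min_eq_left (Nat.le_of_lt hklt)]
    have hstep : aStep code ((cs.take k).map (fA code) ++ cs.drop k) (k : Int)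
        = (cs.take (k + 1)).map (fA code) ++ cs.drop (k + 1) := by
      rw [hdrop, show (k : Int) = (((cs.take k).map (fA code)).length : Int) by rw [hlen],
          aStep_at]
      rw [List.take_add_one, List.getElem?_eq_getElem hklt, List.map_append]
      simp
    rw [hstep, show ((k : Int) + 1) = ((k + 1 : Nat) : Int) by push_cast; ring]
    exact ih (k + 1) cs (by omega)

theorem portA_eq (original code : String) :
    transform_py original code = String.mk (original.toList.map (fA code.toList)) := by
  unfold transform_py
  have h := loopA code.toList original.toList.length 0 original.toList (by omega)
  simp only [List.take_zero, List.map_nil, List.nil_append, List.drop_zero] at h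
  simp only [PySem.List.len_eq, Nat.cast_zero] at *
  rw [show ((0 : Int) = ((0 : Nat) : Int)) by rfl] at h ⊢
  rw [h]

-- B-side analysis -----------------------------------------------------------

-- the cipher index A's arithmetic assigns to a letter
def fIdx (c : Char) : Int :=
  if PySem.Chars.isupper c then (c.toNat : Int) - 65 else 26 + (c.toNat : Int) - 97

-- state of B's output after the first k alphabet passes, as a per-character function
def stepUpto (orig code : List Char) (k : Nat) (c : Char) : Char :=
  if c ∈ lettersB.take k ∧ orig.contains c = true then PySem.List.pyGetD code (fIdx c) c else c

theorem stepUpto_pos (orig code : List Char) (k : Nat) (c : Char)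
    (h1 : c ∈ lettersB.take k) (h2 : orig.contains c = true) :
    stepUpto orig code k c = PySem.List.pyGetD code (fIdx c) c := by
  unfold stepUpto; rw [if_pos ⟨h1, h2⟩]

theorem stepUpto_neg (orig code : List Char) (k : Nat) (c : Char)
    (h : ¬ (c ∈ lettersB.take k ∧ orig.contains c = true)) :
    stepUpto orig code k c = c := by
  unfold stepUpto; rw [if_neg h]

set_option maxRecDepth 10000 in
theorem lettersB_fIdx_all : ((List.range 52).all (fun k => fIdx (lettersB.getD k 'A') == (k : Int))) = true := by decide

theorem lettersB_fIdx (k : Nat) (hk : k < 52) : fIdx (lettersB.getD k 'A') = (k : Int) := by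
  have h := List.all_eq_true.mp lettersB_fIdx_all _ (List.mem_range.mpr hk)
  simpa using h

set_option maxRecDepth 10000 in
theorem lettersB_letter_all : (lettersB.all (fun c =>
    (decide (65 ≤ c.toNat) && decide (c.toNat ≤ 90)) ||
    (decide (97 ≤ c.toNat) && decide (c.toNat ≤ 122)))) = true := by decide

theorem lettersB_letter : ∀ c ∈ lettersB,
    (65 ≤ c.toNat ∧ c.toNat ≤ 90) ∨ (97 ≤ c.toNat ∧ c.toNat ≤ 122) := by
  intro c hc
  have h := List.all_eq_true.mp lettersB_letter_all c hc
  simp only [Bool.or_eq_true, Bool.and_eq_true, decide_eq_true_iff] at h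
  exact h

theorem lettersB_length : lettersB.length = 52 := by decide

theorem mem_lettersB_of_upper (c : Char) (h1 : 65 ≤ c.toNat) (h2 : c.toNat ≤ 90) :
    c ∈ lettersB := by
  unfold lettersB
  refine List.mem_append_left _ (List.mem_map.mpr ⟨c.toNat - 65, List.mem_range.mpr (by omega), ?_⟩)
  rw [show 65 + (c.toNat - 65) = c.toNat by omega]
  exact Char.ofNat_toNat c

theorem mem_lettersB_of_lower (c : Char) (h1 : 97 ≤ c.toNat) (h2 : c.toNat ≤ 122) :
    c ∈ lettersB := by
  unfold lettersB
  refine List.mem_append_right _ (List.mem_map.mpr ⟨c.toNat - 97, List.mem_range.mpr (by omega), ?_⟩)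
  rw [show 97 + (c.toNat - 97) = c.toNat by omega]
  exact Char.ofNat_toNat c

theorem zip_self_map {α β : Type} (l : List α) (g : α → β) :
    l.zip (l.map g) = l.map (fun a => (a, g a)) := by
  induction l with
  | nil => rfl
  | cons x xs ih => simp [ih]

theorem bPass_step (orig code : List Char) (k : Nat) (hk : k < 52) :
    bPass orig code (orig.map (stepUpto orig code k)) ((k : Int), lettersB[k]'(by rw [lettersB_length]; omega))
      = orig.map (stepUpto orig code (k + 1)) := by
  have hkl : k < lettersB.length := by rw [lettersB_length]; omega
  set ℓ := lettersB[k]'hkl with hℓ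
  have hsplit : lettersB.take (k + 1) = lettersB.take k ++ [ℓ] := by
    rw [List.take_add_one, List.getElem?_eq_getElem hkl]; rfl
  have hmem_take_iff : ∀ c : Char, c ∈ lettersB.take (k + 1) ↔ c ∈ lettersB.take k ∨ c = ℓ := by
    intro c
    rw [hsplit]
    simp
  unfold bPass
  by_cases hin : orig.contains ℓ
  · rw [if_pos hin, zip_self_map, List.map_map]
    apply List.map_congr_left
    intro c hc
    by_cases hcl : c = ℓ
    · rw [hcl]
      have hmem : ℓ ∈ lettersB.take (k + 1) := (hmem_take_iff ℓ).mpr (Or.inr rfl)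
      simp only [Function.comp]
      have hq : fIdx ℓ = (k : Int) := by
        have := lettersB_fIdx k hk
        rwa [List.getD_eq_getElem _ _ hkl] at this
      rw [stepUpto_pos orig code (k + 1) ℓ hmem hin, hq]
      simp
    · simp only [Function.comp, if_neg hcl]
      by_cases h1 : c ∈ lettersB.take k ∧ orig.contains c = true
      · rw [stepUpto_pos orig code k c h1.1 h1.2,
            stepUpto_pos orig code (k + 1) c ((hmem_take_iff c).mpr (Or.inl h1.1)) h1.2]
      · rw [stepUpto_neg orig code k c h1, stepUpto_neg orig code (k + 1) c (by
          rintro ⟨hm, hco⟩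
          exact h1 ⟨((hmem_take_iff c).mp hm).resolve_right hcl, hco⟩)]
  · rw [if_neg hin]
    apply List.map_congr_left
    intro c hc
    have hcl : c ≠ ℓ := by
      intro h
      rw [h] at hc
      exact hin (List.contains_iff_mem.mpr hc)
    by_cases h1 : c ∈ lettersB.take k ∧ orig.contains c = true
    · rw [stepUpto_pos orig code k c h1.1 h1.2,
          stepUpto_pos orig code (k + 1) c ((hmem_take_iff c).mpr (Or.inl h1.1)) h1.2]
    · rw [stepUpto_neg orig code k c h1, stepUpto_neg orig code (k + 1) c (by
        rintro ⟨hm, hco⟩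
        exact h1 ⟨((hmem_take_iff c).mp hm).resolve_right hcl, hco⟩)]

theorem loopB (orig code : List Char) : ∀ (m k : Nat), k + m = 52 →
    (PySem.List.enumerate (lettersB.drop k) (k : Int)).foldl (bPass orig code)
      (orig.map (stepUpto orig code k)) = orig.map (stepUpto orig code 52) := by
  intro m
  induction m with
  | zero =>
    intro k hk
    have : lettersB.drop k = [] := by
      rw [List.drop_eq_nil_iff, lettersB_length]; omega
    rw [this, PySem.List.enumerate_nil, List.foldl_nil, show k = 52 by omega]
  | succ m ih =>
    intro k hk
    have hkl : k < lettersB.length := by rw [lettersB_length]; omega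
    rw [List.drop_eq_getElem_cons hkl, PySem.List.enumerate_cons, List.foldl_cons,
        bPass_step orig code k (by omega),
        show ((k : Int) + 1) = ((k + 1 : Nat) : Int) by push_cast; ring]
    exact ih (k + 1) (by omega)

theorem stepUpto_zero (orig code : List Char) : orig.map (stepUpto orig code 0) = orig := by
  have h : orig.map (stepUpto orig code 0) = orig.map id :=
    List.map_congr_left (fun c _ => by unfold stepUpto; simp)
  rw [h, List.map_id]

theorem stepUpto_final (orig code : List Char) (c : Char) (hc : c ∈ orig) :
    stepUpto orig code 52 c = fA code c := by
  have htake : lettersB.take 52 = lettersB := by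
    rw [← lettersB_length, List.take_length]
  unfold fA
  by_cases hup : PySem.Chars.isupper c = true
  · obtain ⟨h1, h2⟩ := (isupper_iff c).mp hup
    rw [stepUpto_pos orig code 52 c (htake ▸ mem_lettersB_of_upper c h1 h2)
          (List.contains_iff_mem.mpr hc), if_pos hup]
    unfold fIdx
    rw [if_pos hup]
  · by_cases hlo : PySem.Chars.islower c = true
    · obtain ⟨h1, h2⟩ := (islower_iff c).mp hlo
      rw [stepUpto_pos orig code 52 c (htake ▸ mem_lettersB_of_lower c h1 h2)
            (List.contains_iff_mem.mpr hc), if_neg hup, if_pos hlo]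
      unfold fIdx
      rw [if_neg hup]
    · have hnm : c ∉ lettersB := by
        intro hm
        rcases lettersB_letter c hm with h | h
        · exact hup ((isupper_iff c).mpr h)
        · exact hlo ((islower_iff c).mpr h)
      rw [stepUpto_neg orig code 52 c (fun h => hnm (htake ▸ h.1)), if_neg hup, if_neg hlo]

theorem portB_eq (original code : String) :
    transform_py_alt original code = String.mk (original.toList.map (fA code.toList)) := by
  unfold transform_py_alt
  have h0 := loopB original.toList code.toList 52 0 (by omega)
  rw [stepUpto_zero] at h0
  simp only [List.drop_zero, Nat.cast_zero] at h0
  rw [show (PySem.List.enumerate lettersB : List (Int × Char)) = PySem.List.enumerate lettersB (0 : Int) from rfl]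
  rw [h0]
  congr 1
  exact List.map_congr_left (fun c hc => stepUpto_final original.toList code.toList c hc)

-- ===== VERDICT (by name: the statement is the Claim_ definition above) =====
theorem transform_py_spec : Claim_equal_transform_py := by
  intro original code _ _
  unfold Spec_transform_py
  rw [portA_eq, portB_eq]
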